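-- pv_equiv track=rewrite | github.com/ZekNikZ/adventofcode2022 | day25/puzzle1.py | convert_to_snafu
-- ===== SOURCE A (Python) =====
-- def convert_to_snafu(num: int):
--     res = ''
--     while num != 0:
--         num, m = divmod(num, 5)
--         if m >= 3:
--             num += 1
--             m -= 5
--         res += "=-012"[m+2]
--     return res[::-1]
-- ===== SOURCE B (Python) =====
-- def convert_to_snafu(num: int):
--     if num == 0:
--         return ''
--     q, m = divmod(num + 2, 5)
--     return convert_to_snafu(q) + "=-012"[m]
-- ===== Notes on version B (the rewrite author's own statement) =====
-- stated objective: simpler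
-- what changed: Replaced the iterative accumulate-then-reverse loop with its explicit carry branch by a two-line recursion on divmod(num+2,5): the +2 offset makes the remainder index the digit table directly, eliminating the if m>=3 adjustment, the accumulator and the [::-1] reversal.
import Mathlib
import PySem

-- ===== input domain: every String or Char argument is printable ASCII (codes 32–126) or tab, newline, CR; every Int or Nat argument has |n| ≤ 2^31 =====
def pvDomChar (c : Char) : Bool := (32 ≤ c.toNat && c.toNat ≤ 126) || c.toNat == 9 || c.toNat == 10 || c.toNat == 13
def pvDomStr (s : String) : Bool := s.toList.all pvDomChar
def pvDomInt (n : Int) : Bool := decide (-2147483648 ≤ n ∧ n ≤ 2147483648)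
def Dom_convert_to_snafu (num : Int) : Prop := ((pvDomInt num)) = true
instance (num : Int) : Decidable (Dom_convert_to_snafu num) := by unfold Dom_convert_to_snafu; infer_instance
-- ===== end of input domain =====

-- B replaces A's accumulate-then-reverse loop and its carry branch by a two-line recursion on
-- divmod(num+2,5), where the +2 offset indexes the digit table directly; objective: simpler.


-- termination measure for A's carry-adjusted quotient step
theorem snafu_stepA_lt (num : Int) (h : num ≠ 0) :
    (if PySem.Int.mod num 5 ≥ 3 then PySem.Int.floordiv num 5 + 1 else PySem.Int.floordiv num 5).natAbs
      < num.natAbs := by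
  have h1 := PySem.Int.floordiv_mul_add_mod num 5
  have h2 := PySem.Int.mod_nonneg (a := num) (b := 5) (by norm_num)
  have h3 := PySem.Int.mod_lt (a := num) (b := 5) (by norm_num)
  split_ifs <;> omega

-- termination measure for B's offset quotient step
theorem snafu_stepB_lt (num : Int) (h : num ≠ 0) :
    (PySem.Int.floordiv (num + 2) 5).natAbs < num.natAbs := by
  have h1 := PySem.Int.floordiv_mul_add_mod (num + 2) 5
  have h2 := PySem.Int.mod_nonneg (a := num + 2) (b := 5) (by norm_num)
  have h3 := PySem.Int.mod_lt (a := num + 2) (b := 5) (by norm_num)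
  omega

-- ===== PORT A =====
-- A's while-loop, step for step: `res` kept as List Char (character-exact); `divmod(num, 5)`
-- is floordiv/mod; the index "=-012"[m+2] is always in range after the carry adjustment, so
-- the `none` arm of pyGet? is a totality guard only.
def snafuLoopA (num : Int) (res : List Char) : List Char :=
  if num = 0 then res
  else
    let m0 := PySem.Int.mod num 5
    let q := if m0 ≥ 3 then PySem.Int.floordiv num 5 + 1 else PySem.Int.floordiv num 5
    let m := if m0 ≥ 3 then m0 - 5 else m0
    snafuLoopA q (res ++ (match PySem.Str.pyGet? "=-012" (m + 2) with
      | some c => [c] | none => []))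
termination_by num.natAbs
decreasing_by exact snafu_stepA_lt num (by assumption)

def convert_to_snafu (num : Int) : String :=
  String.ofList ((snafuLoopA num []).reverse)   -- res[::-1]

-- ===== PORT B =====
-- Source B verbatim: recursion on divmod(num + 2, 5); no carry branch, no reversal.
def convert_to_snafu_alt (num : Int) : String :=
  if num = 0 then ""
  else
    convert_to_snafu_alt (PySem.Int.floordiv (num + 2) 5) ++
      (match PySem.Str.pyGet? "=-012" (PySem.Int.mod (num + 2) 5) with
        | some c => String.singleton c | none => "")
termination_by num.natAbs
decreasing_by exact snafu_stepB_lt num (by assumption)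

-- ===== PRECONDITION & SPEC =====
def Spec_convert_to_snafu (num : Int) (out : String) : Prop := out = convert_to_snafu_alt num
instance (num : Int) (out : String) : Decidable (Spec_convert_to_snafu num out) := by unfold Spec_convert_to_snafu; infer_instance

-- ===== CLAIM (what is proved, stated in full; the proofs are below) =====
def Claim_equal_convert_to_snafu : Prop := ∀ (num : Int), Dom_convert_to_snafu num → Spec_convert_to_snafu num (convert_to_snafu num)

-- ===== LEMMAS AND PROOFS =====

-- A's carry-adjusted step equals B's offset step
theorem snafu_step_eq (num : Int) :
    ((if PySem.Int.mod num 5 ≥ 3 then PySem.Int.floordiv num 5 + 1 else PySem.Int.floordiv num 5)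
        = PySem.Int.floordiv (num + 2) 5)
    ∧ ((if PySem.Int.mod num 5 ≥ 3 then PySem.Int.mod num 5 - 5 else PySem.Int.mod num 5) + 2
        = PySem.Int.mod (num + 2) 5) := by
  have h1 := PySem.Int.floordiv_mul_add_mod num 5
  have h2 := PySem.Int.mod_nonneg (a := num) (b := 5) (by norm_num)
  have h3 := PySem.Int.mod_lt (a := num) (b := 5) (by norm_num)
  have h4 := PySem.Int.floordiv_mul_add_mod (num + 2) 5
  have h5 := PySem.Int.mod_nonneg (a := num + 2) (b := 5) (by norm_num)
  have h6 := PySem.Int.mod_lt (a := num + 2) (b := 5) (by norm_num)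
  constructor <;> split_ifs <;> omega

-- A's loop only appends to the accumulator
theorem snafuLoopA_append (num : Int) (res : List Char) :
    snafuLoopA num res = res ++ snafuLoopA num [] := by
  induction hn : num.natAbs using Nat.strong_induction_on generalizing num res with
  | _ n ih =>
  subst hn
  by_cases h : num = 0
  · conv_lhs => rw [snafuLoopA]
    conv_rhs => rw [snafuLoopA]
    simp [h]
  · have hlt := snafu_stepA_lt num h
    conv_lhs => rw [snafuLoopA]
    conv_rhs => rw [snafuLoopA]
    simp only [if_neg h, List.nil_append]
    rw [ih _ hlt _ _ rfl]
    conv_rhs => rw [ih _ hlt _ _ rfl]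
    simp only [List.append_assoc]

theorem snafu_main (num : Int) :
    String.ofList ((snafuLoopA num []).reverse) = convert_to_snafu_alt num := by
  induction hn : num.natAbs using Nat.strong_induction_on generalizing num with
  | _ n ih =>
  subst hn
  by_cases h : num = 0
  · conv_lhs => rw [snafuLoopA]
    rw [convert_to_snafu_alt]
    simp [h]
  · have hlt := snafu_stepA_lt num h
    conv_lhs => rw [snafuLoopA]
    conv_rhs => rw [convert_to_snafu_alt]
    simp only [if_neg h, List.nil_append]
    rw [snafuLoopA_append]
    rw [(snafu_step_eq num).1] at hlt ⊢
    rw [← ih _ hlt _ rfl, (snafu_step_eq num).2]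
    cases PySem.Str.pyGet? "=-012" (PySem.Int.mod (num + 2) 5) <;>
      simp [String.singleton_eq_ofList, ← String.ofList_append]

-- ===== VERDICT (by name: the statement is the Claim_ definition above) =====
theorem convert_to_snafu_spec : Claim_equal_convert_to_snafu := by
  intro num _
  exact snafu_main num
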